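-- pv_equiv track=rewrite | github.com/KarrLab/paper_2018_curr_opin_sys_biol | get_author_emails.py | get_email
-- ===== SOURCE A (Python) =====
-- def get_email(affiliation):
--     if '@' not in affiliation:
--         return None
--
--     for word in reversed(affiliation.split(' ')):
--         if '@' in word:
--             if word[-1] == '.':
--                 return word[0:-1]
--             else:
--                 return word
-- ===== SOURCE B (Python) =====
-- def get_email(affiliation):
--     # single left-to-right character scan: keep the current word and the last
--     # '@'-containing word seen so far; no split(), no reversed()
--     best = None
--     cur = ''
--     for ch in affiliation:
--         if ch == ' ':
--             if '@' in cur: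
--                 best = cur
--             cur = ''
--         else:
--             cur += ch
--     if '@' in cur:
--         best = cur
--     if best is None:
--         return None
--     return best[:-1] if best.endswith('.') else best
-- ===== Notes on version B (the rewrite author's own statement) =====
-- stated objective: alternative
-- what changed: Replaced the split-into-a-word-list plus reversed scan with early return by a single left-to-right character pass that maintains the current word and the last word containing an at-sign, deciding everything in one traversal without building the word list.
import Mathlib
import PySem

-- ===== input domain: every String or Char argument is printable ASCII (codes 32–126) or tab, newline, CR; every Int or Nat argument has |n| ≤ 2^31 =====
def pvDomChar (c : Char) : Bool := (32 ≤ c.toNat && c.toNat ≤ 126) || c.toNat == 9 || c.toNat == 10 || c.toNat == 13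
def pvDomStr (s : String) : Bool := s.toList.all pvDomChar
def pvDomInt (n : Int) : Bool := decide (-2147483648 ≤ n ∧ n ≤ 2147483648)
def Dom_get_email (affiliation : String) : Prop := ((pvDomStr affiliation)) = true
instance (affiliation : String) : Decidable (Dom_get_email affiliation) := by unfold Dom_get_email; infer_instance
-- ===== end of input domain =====

-- B replaces A's split-then-reversed-scan by a single left-to-right character scan that
-- keeps the current word and the last word containing an at-sign (objective: alternative).

-- ===== PORT A =====
-- A: 'word[-1]' can only be evaluated on a word containing '@', hence nonempty, so the
-- 'some' comparison is exact (the none case would be Python's IndexError, unreachable).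
def pvProcA (w : List Char) : List Char :=
  if PySem.Chars.pyGet? w (-1) = some '.' then PySem.Chars.slice w (some 0) (some (-1)) else w

def pvGoA : List (List Char) → Option (List Char)
  | [] => none
  | w :: ws => if PySem.Chars.isIn ['@'] w = true then some (pvProcA w) else pvGoA ws

def get_email (affiliation : String) : Option String :=
  if PySem.Str.isIn "@" affiliation = false then none
  else Option.map String.ofList (pvGoA ((PySem.Chars.splitOn affiliation.toList [' ']).reverse))

-- ===== PORT B =====
def pvStepB (p : Option (List Char) × List Char) (c : Char) : Option (List Char) × List Char :=
  if c = ' ' then (if PySem.Chars.isIn ['@'] p.2 = true then some p.2 else p.1, [])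
  else (p.1, p.2 ++ [c])

def get_email_alt (affiliation : String) : Option String :=
  let st := affiliation.toList.foldl pvStepB (none, [])
  let best := if PySem.Chars.isIn ['@'] st.2 = true then some st.2 else st.1
  match best with
  | none => none
  | some w =>
      some (String.ofList
        (if PySem.Chars.endswith w ['.'] = true then PySem.Chars.slice w none (some (-1)) else w))

-- ===== PRECONDITION & SPEC =====
def Spec_get_email (affiliation : String) (out : Option String) : Prop := out = get_email_alt affiliation
instance (affiliation : String) (out : Option String) : Decidable (Spec_get_email affiliation out) := by unfold Spec_get_email; infer_instance

-- ===== CLAIM (what is proved, stated in full; the proofs are below) =====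
def Claim_equal_get_email : Prop := ∀ (affiliation : String), Dom_get_email affiliation → Spec_get_email affiliation (get_email affiliation)

-- ===== LEMMAS AND PROOFS =====

-- simple structural recursion equal to PySem.Chars.splitOn · [' ']
def pvSOS : List Char → List (List Char)
  | [] => [[]]
  | c :: l => if c = ' ' then [] :: pvSOS l else List.modifyHead (fun w => c :: w) (pvSOS l)

def pvLastM : List (List Char) → Option (List Char) → Option (List Char)
  | [], b => b
  | w :: ws, b => pvLastM ws (if PySem.Chars.isIn ['@'] w = true then some w else b)

def pvFirstM : List (List Char) → Option (List Char)
  | [] => none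
  | w :: ws => if PySem.Chars.isIn ['@'] w = true then some w else pvFirstM ws

theorem pv_modifyHead_comp {α : Type} (f g : List α → List α) (ws : List (List α)) :
    List.modifyHead f (List.modifyHead g ws) = List.modifyHead (fun w => f (g w)) ws := by
  cases ws <;> simp

theorem pv_modifyHead_nil {α : Type} (ws : List (List α)) :
    List.modifyHead (fun w => [] ++ w) ws = ws := by
  cases ws <;> simp

theorem pv_modifyHead_id {α : Type} (ws : List (List α)) :
    List.modifyHead (fun w => w) ws = ws := by
  cases ws <;> simp

theorem pv_go_nil (f : ℕ) (cur : List Char) (acc : List (List Char)) :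
    PySem.Chars.splitOn.go [' '] (f+1) [] cur acc = (cur.reverse :: acc).reverse := by
  rw [PySem.Chars.splitOn.go]
  simp

theorem pv_go_step (f : ℕ) (c : Char) (rest cur : List Char) (acc : List (List Char)) :
    PySem.Chars.splitOn.go [' '] (f+1) (c::rest) cur acc =
      if c = ' ' then PySem.Chars.splitOn.go [' '] f rest [] (cur.reverse :: acc)
      else PySem.Chars.splitOn.go [' '] f rest (c :: cur) acc := by
  rw [PySem.Chars.splitOn.go]
  by_cases h : c = ' ' <;> simp [h, List.isPrefixOf] <;> intro h' <;> exact absurd h'.symm h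

theorem pv_go_spec (l : List Char) : ∀ (fuel : ℕ) (cur : List Char) (acc : List (List Char)),
    l.length < fuel →
    PySem.Chars.splitOn.go [' '] fuel l cur acc =
      acc.reverse ++ List.modifyHead (fun w => cur.reverse ++ w) (pvSOS l) := by
  induction l with
  | nil =>
      intro fuel cur acc h
      obtain ⟨f, rfl⟩ : ∃ f, fuel = f + 1 := ⟨fuel - 1, by omega⟩
      rw [pv_go_nil]
      simp [pvSOS]
  | cons c rest ih =>
      intro fuel cur acc h
      obtain ⟨f, rfl⟩ : ∃ f, fuel = f + 1 := ⟨fuel - 1, by omega⟩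
      rw [pv_go_step]
      by_cases hc : c = ' '
      · rw [if_pos hc, ih f [] (cur.reverse :: acc) (by simp only [List.length_cons] at h; omega)]
        simp [pvSOS, hc, pv_modifyHead_id]
      · rw [if_neg hc, ih f (c :: cur) acc (by simp only [List.length_cons] at h; omega)]
        simp only [pvSOS, if_neg hc, pv_modifyHead_comp]
        congr 1
        congr 1
        funext w
        simp
theorem pv_splitOn_eq (l : List Char) : PySem.Chars.splitOn l [' '] = pvSOS l := by
  unfold PySem.Chars.splitOn
  rw [pv_go_spec l (l.length + 1) [] [] (by omega)]
  simp [pv_modifyHead_id]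

theorem pv_foldB_spec (l : List Char) : ∀ (b0 : Option (List Char)) (cur0 : List Char),
    (if PySem.Chars.isIn ['@'] (l.foldl pvStepB (b0, cur0)).2 = true
       then some (l.foldl pvStepB (b0, cur0)).2 else (l.foldl pvStepB (b0, cur0)).1)
      = pvLastM (List.modifyHead (fun w => cur0 ++ w) (pvSOS l)) b0 := by
  induction l with
  | nil => intro b0 cur0; simp [pvSOS, pvLastM]
  | cons c rest ih =>
      intro b0 cur0
      by_cases hc : c = ' '
      · simp only [List.foldl_cons, pvStepB, if_pos hc, pvSOS]
        rw [ih]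
        simp [pvLastM, pv_modifyHead_id]
      · simp only [List.foldl_cons, pvStepB, if_neg hc, pvSOS]
        rw [ih]
        rw [pv_modifyHead_comp]
        congr 1
        congr 1
        funext w
        simp

theorem pv_firstM_append (xs ys : List (List Char)) :
    pvFirstM (xs ++ ys) = match pvFirstM xs with
      | some v => some v
      | none => pvFirstM ys := by
  induction xs with
  | nil => simp [pvFirstM]
  | cons w ws ih =>
      simp only [List.cons_append, pvFirstM, ih]
      by_cases h : PySem.Chars.isIn ['@'] w = true <;> simp [h]

theorem pv_lastM_firstM (ws : List (List Char)) : ∀ (b : Option (List Char)),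
    pvLastM ws b = match pvFirstM ws.reverse with
      | some v => some v
      | none => b := by
  induction ws with
  | nil => intro b; simp [pvLastM, pvFirstM]
  | cons w ws ih =>
      intro b
      simp only [pvLastM, List.reverse_cons, pv_firstM_append, ih]
      cases pvFirstM ws.reverse <;> by_cases h : PySem.Chars.isIn ['@'] w = true <;>
        simp [h, pvFirstM]

theorem pv_goA_eq (ws : List (List Char)) : pvGoA ws = Option.map pvProcA (pvFirstM ws) := by
  induction ws with
  | nil => simp [pvGoA, pvFirstM]
  | cons w ws ih =>
      by_cases h : PySem.Chars.isIn ['@'] w = true <;> simp [pvGoA, pvFirstM, h, ih]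

theorem pv_firstM_at {ws : List (List Char)} {w : List Char} (h : pvFirstM ws = some w) :
    PySem.Chars.isIn ['@'] w = true := by
  induction ws with
  | nil => simp [pvFirstM] at h
  | cons v ws ih =>
      by_cases hv : PySem.Chars.isIn ['@'] v = true
      · simp only [pvFirstM, if_pos hv, Option.some.injEq] at h; exact h ▸ hv
      · simp only [pvFirstM, if_neg hv] at h; exact ih h

theorem pv_singleton_infix (a : Char) (l : List Char) : ([a] <:+: l) ↔ a ∈ l := by
  constructor
  · rintro ⟨s, t, rfl⟩; simp
  · intro h
    obtain ⟨s, t, rfl⟩ := List.append_of_mem h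
    exact ⟨s, t, by simp⟩

theorem pv_mem_pvSOS (l : List Char) : ∀ w ∈ pvSOS l, ∀ a ∈ w, a ∈ l := by
  induction l with
  | nil => intro w hw a ha; simp [pvSOS] at hw; simp [hw] at ha
  | cons c rest ih =>
      intro w hw a ha
      by_cases hc : c = ' '
      · simp only [pvSOS, if_pos hc, List.mem_cons] at hw
        rcases hw with rfl | hw
        · simp at ha
        · exact List.mem_cons_of_mem _ (ih w hw a ha)
      · simp only [pvSOS, if_neg hc] at hw
        cases hs : pvSOS rest with
        | nil =>
            rw [hs] at hw; simp at hw
        | cons h t =>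
            rw [hs] at hw
            simp only [List.modifyHead, List.mem_cons] at hw
            rcases hw with rfl | hw
            · rcases List.mem_cons.mp ha with rfl | ha'
              · exact List.mem_cons_self
              · exact List.mem_cons_of_mem _ (ih h (hs ▸ List.mem_cons_self) a ha')
            · exact List.mem_cons_of_mem _ (ih w (hs ▸ List.mem_cons_of_mem _ hw) a ha)

theorem pv_lastM_of_none (ws : List (List Char)) (b : Option (List Char))
    (h : ∀ w ∈ ws, PySem.Chars.isIn ['@'] w = false) : pvLastM ws b = b := by
  induction ws generalizing b with
  | nil => rfl
  | cons w ws ih =>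
      simp only [pvLastM, h w List.mem_cons_self]
      exact ih _ (fun v hv => h v (List.mem_cons_of_mem _ hv))

theorem pv_pyGet_last (w : List Char) (h : w ≠ []) :
    PySem.List.pyGet? w (-1) = w.getLast? := by
  have hl : 0 < w.length := List.length_pos_iff.mpr h
  simp only [PySem.List.pyGet?, PySem.List.pyIdx?]
  rw [if_neg (by omega), if_pos (by omega)]
  simp only [Option.bind_some, List.getLast?_eq_getElem?]
  norm_num

theorem pv_slice_dropLast₀ (w : List Char) :
    PySem.List.slice w (some 0) (some (-1)) = w.dropLast := by
  simp only [PySem.List.slice, PySem.List.clampIdx]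
  norm_num
  rcases eq_or_ne w [] with h | h
  · simp [h]
  · rw [if_neg h, List.dropLast_eq_take]
    congr 1
    have : 0 < w.length := List.length_pos_iff.mpr h
    omega

theorem pv_slice_dropLast (w : List Char) :
    PySem.List.slice w none (some (-1)) = w.dropLast := by
  simp only [PySem.List.slice, PySem.List.clampIdx]
  norm_num
  rcases eq_or_ne w [] with h | h
  · simp [h]
  · rw [if_neg h, List.dropLast_eq_take]
    congr 1
    have : 0 < w.length := List.length_pos_iff.mpr h
    omega

theorem pv_endswith_getLast (w : List Char) :
    (PySem.Chars.endswith w ['.'] = true) ↔ w.getLast? = some '.' := by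
  rw [PySem.Chars.endswith_iff, List.getLast?_eq_some_iff]
  constructor
  · rintro ⟨t, rfl⟩; exact ⟨t, rfl⟩
  · rintro ⟨t, rfl⟩; exact ⟨t, rfl⟩

theorem pv_proc_eq (w : List Char) (h : PySem.Chars.isIn ['@'] w = true) :
    pvProcA w =
      (if PySem.Chars.endswith w ['.'] = true then PySem.Chars.slice w none (some (-1)) else w) := by
  have hne : w ≠ [] := by
    intro hw
    rw [hw] at h
    rw [PySem.Chars.isIn_iff_infix, List.infix_nil] at h
    exact absurd h (by simp)
  unfold pvProcA
  rw [PySem.Chars.pyGet?_eq_listPyGet?, pv_pyGet_last w hne,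
      PySem.Chars.slice_eq_listSlice, PySem.Chars.slice_eq_listSlice,
      pv_slice_dropLast₀, pv_slice_dropLast]
  by_cases hd : w.getLast? = some '.'
  · rw [if_pos hd, if_pos ((pv_endswith_getLast w).mpr hd)]
  · rw [if_neg hd, if_neg (fun hc => hd ((pv_endswith_getLast w).mp hc))]

-- ===== VERDICT (by name: the statement is the Claim_ definition above) =====
theorem get_email_spec : Claim_equal_get_email := by
  unfold Claim_equal_get_email
  intro s _
  unfold Spec_get_email get_email get_email_alt
  have hiff : PySem.Str.isIn "@" s = PySem.Chars.isIn ['@'] s.toList := by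
    rw [PySem.Str.isIn_eq, show "@".toList = ['@'] from by decide]
  have hB := pv_foldB_spec s.toList none []
  rw [pv_modifyHead_nil] at hB
  by_cases h : PySem.Chars.isIn ['@'] s.toList = true
  · rw [if_neg (by rw [hiff, h]; simp)]
    rw [pv_splitOn_eq, pv_goA_eq]
    simp only []
    rw [hB, pv_lastM_firstM]
    cases hf : pvFirstM (pvSOS s.toList).reverse with
    | none => simp
    | some w =>
        simp only [Option.map_some]
        rw [pv_proc_eq w (pv_firstM_at hf)]
  · rw [if_pos (by rw [hiff]; simpa using h)]
    simp only []
    rw [hB]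
    have hall : ∀ w ∈ pvSOS s.toList, PySem.Chars.isIn ['@'] w = false := by
      intro w hw
      rw [PySem.Chars.isIn_eq_false_iff, pv_singleton_infix]
      intro ha
      have : '@' ∈ s.toList :=
        pv_mem_pvSOS s.toList w hw _ ha
      rw [← pv_singleton_infix, ← PySem.Chars.isIn_iff_infix] at this
      exact absurd this (by simpa using h)
    rw [pv_lastM_of_none _ _ hall]
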